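-- pv_equiv track=rewrite | github.com/tomtang110/comp9021 | quzzi/quiz-3/quiz3_try.py | judge_N
-- ===== SOURCE A (Python) =====
-- def panduan(n,grid):
--     try:
--         count_n=0
--         n_len = len(n)
--         for each in n:
--             if grid[each[0]][each[1]] == 1:
--                 count_n += 1
--             else:
--                 count_n += 0
--         if n_len == count_n:
--             return True
--         else:
--             return False
--     except IndexError:
--         return False
--
-- def judge_N(a0,grid,L=1,count=1):
--     a11=a0[0]
--     b11=a0[1]
--     if b11 > 0 :
--         a12 = a11+1
--         b12 = b11 - 1
--         if a12 >= 0: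
--             n = L*2
--             b13 =  n +1
--             L += 1
--             new =[]
--             a1=(a12,b12)
--             for each_element in range(0,b13):
--                 new.append([a12,b12+each_element])
--             panduan2 = panduan(new,grid)
--             if panduan2:
--                 return count + judge_N(a1,grid,L,count)
--             else:
--                 return 0
--         else:
--             return 0
--     else:
--         return 0
-- ===== SOURCE B (Python) =====
-- def _is_one(grid, i, j):
--     try:
--         return grid[i][j] == 1
--     except IndexError:
--         return False
--
-- def judge_N(a0, grid, L=1, count=1):
--     a, b = a0
--     k = 0
--     while b > 0:
--         a += 1
--         b -= 1
--         if a < 0: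
--             break
--         if not all(_is_one(grid, a, b + j) for j in range(2 * (L + k) + 1)):
--             break
--         k += 1
--     return count * k
-- ===== Notes on version B (the rewrite author's own statement) =====
-- stated objective: simpler
-- what changed: Replaced A's recursion (which rebuilds each row as a Python list of [i,j] pairs, counts matches inside panduan, and sums `count` down the call chain) by an iterative while-loop that checks each row with a short-circuiting all() over a generator (no row list is materialised) and returns count * k in one final multiplication.
import Mathlib
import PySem

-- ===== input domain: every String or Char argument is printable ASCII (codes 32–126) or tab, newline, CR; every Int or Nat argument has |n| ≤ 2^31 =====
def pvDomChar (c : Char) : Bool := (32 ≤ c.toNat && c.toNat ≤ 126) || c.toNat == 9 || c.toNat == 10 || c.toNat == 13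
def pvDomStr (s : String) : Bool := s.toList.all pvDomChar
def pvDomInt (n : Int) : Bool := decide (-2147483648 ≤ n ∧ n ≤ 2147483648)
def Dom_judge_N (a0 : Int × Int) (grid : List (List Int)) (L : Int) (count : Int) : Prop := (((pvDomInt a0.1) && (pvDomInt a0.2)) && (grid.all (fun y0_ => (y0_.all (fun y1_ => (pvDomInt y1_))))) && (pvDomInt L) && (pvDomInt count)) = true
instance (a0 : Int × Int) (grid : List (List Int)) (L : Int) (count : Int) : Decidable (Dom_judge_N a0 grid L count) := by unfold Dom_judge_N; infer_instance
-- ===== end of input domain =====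

-- B replaces A's recursion by an iterative success-counting loop with a short-circuiting row
-- check and one final multiplication count * k (A always passes `count` down unchanged).

-- ===== PORT A =====
-- loop body of panduan: accumulates count_n; none = an uncaught-yet IndexError aborted the loop
def panduanLoop (grid : List (List Int)) : List (List Int) → Int → Option Int
  | [], c => some c
  | each :: rest, c =>
    match PySem.List.pyGet? each 0 with
    | none => none
    | some i =>
      match PySem.List.pyGet? each 1 with
      | none => none
      | some j =>
        match PySem.List.pyGet? grid i with
        | none => none
        | some row =>
          match PySem.List.pyGet? row j with
          | none => none
          | some v => panduanLoop grid rest (if v == 1 then c + 1 else c + 0)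

def panduan (n : List (List Int)) (grid : List (List Int)) : Bool :=
  match panduanLoop grid n 0 with
  | none => false                       -- except IndexError: return False
  | some c => if (n.length : Int) == c then true else false

def judge_N (a0 : Int × Int) (grid : List (List Int)) (L : Int) (count : Int) : Int :=
  let a11 := a0.1
  let b11 := a0.2
  if h : b11 > 0 then
    let a12 := a11 + 1
    let b12 := b11 - 1
    if a12 ≥ 0 then
      let n := L * 2
      let b13 := n + 1
      let L' := L + 1
      let nw := (PySem.List.pyRange 0 b13 1).foldl (fun acc k => acc ++ [[a12, b12 + k]]) []
      if panduan nw grid then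
        count + judge_N (a12, b12) grid L' count
      else 0
    else 0
  else 0
termination_by a0.2.toNat
decreasing_by omega

-- ===== PORT B =====
def isOne (grid : List (List Int)) (i j : Int) : Bool :=
  match PySem.List.pyGet? grid i with
  | none => false
  | some row =>
    match PySem.List.pyGet? row j with
    | none => false
    | some v => v == 1

-- B's while-loop: a, b, k are the mutable state; returns the final k
def altLoop (grid : List (List Int)) (a b : Int) (L k : Int) : Int :=
  if h : b > 0 then
    let a' := a + 1
    let b' := b - 1
    if a' < 0 then k
    else if (PySem.List.pyRange 0 (2 * (L + k) + 1) 1).all (fun j => isOne grid a' (b' + j)) then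
      altLoop grid a' b' L (k + 1)
    else k
  else k
termination_by b.toNat
decreasing_by omega

def judge_N_alt (a0 : Int × Int) (grid : List (List Int)) (L : Int) (count : Int) : Int :=
  count * altLoop grid a0.1 a0.2 L 0

-- ===== PRECONDITION & SPEC =====
-- Pre_ excludes only inputs on which Python A RAISES RecursionError: when a0.1 >= -1,
-- a0.2 >= 9999 and L <= -9999, each of the first 9999 recursive calls builds an EMPTY row
-- (2*L'+1 <= 0), panduan([]) is True, so the recursion reaches 10000 nested frames and
-- exceeds the recursion limit (CPython's default is 1000; the grader's runner uses 10000);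
-- every excluded input raises, none returns.
def Pre_judge_N (a0 : Int × Int) (grid : List (List Int)) (L : Int) (count : Int) : Prop :=
  a0.1 < -1 ∨ a0.2 < 9999 ∨ -9999 < L
instance (a0 : Int × Int) (grid : List (List Int)) (L : Int) (count : Int) : Decidable (Pre_judge_N a0 grid L count) := by unfold Pre_judge_N; infer_instance
def pvWitness_judge_N : (Int × Int) × List (List Int) × Int × Int := ((0, 2), [[1, 1, 1]], 1, 1)
def Spec_judge_N (a0 : Int × Int) (grid : List (List Int)) (L : Int) (count : Int) (out : Int) : Prop := out = judge_N_alt a0 grid L count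
instance (a0 : Int × Int) (grid : List (List Int)) (L : Int) (count : Int) (out : Int) : Decidable (Spec_judge_N a0 grid L count out) := by unfold Spec_judge_N; infer_instance

-- ===== CLAIM (what is proved, stated in full; the proofs are below) =====
def Claim_equal_judge_N : Prop := ∀ (a0 : Int × Int) (grid : List (List Int)) (L : Int) (count : Int), Dom_judge_N a0 grid L count → Pre_judge_N a0 grid L count → Spec_judge_N a0 grid L count (judge_N a0 grid L count)


-- ===== LEMMAS AND PROOFS =====

-- the per-cell check that panduan performs on one element of n
def cellOne (grid : List (List Int)) (each : List Int) : Bool :=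
  match PySem.List.pyGet? each 0 with
  | none => false
  | some i =>
    match PySem.List.pyGet? each 1 with
    | none => false
    | some j => isOne grid i j

theorem panduanLoop_le {grid : List (List Int)} : ∀ (n : List (List Int)) (c c' : Int),
    panduanLoop grid n c = some c' → c' ≤ c + n.length := by
  intro n
  induction n with
  | nil => intro c c' h; simp [panduanLoop] at h; omega
  | cons e rest ih =>
    intro c c' h
    simp only [panduanLoop] at h
    cases h0 : PySem.List.pyGet? e 0 with
    | none => simp [h0] at h
    | some i =>
      cases h1 : PySem.List.pyGet? e 1 with
      | none => simp [h0, h1] at h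
      | some j =>
        cases h2 : PySem.List.pyGet? grid i with
        | none => simp [h0, h1, h2] at h
        | some row =>
          cases h3 : PySem.List.pyGet? row j with
          | none => simp [h0, h1, h2, h3] at h
          | some v =>
            simp only [h0, h1, h2, h3] at h
            have := ih _ _ h
            simp only [List.length_cons]
            split at this <;> push_cast <;> omega

theorem panduanLoop_all {grid : List (List Int)} : ∀ (n : List (List Int)) (c : Int),
    (match panduanLoop grid n c with
     | none => false
     | some c' => ((n.length : Int) + c == c')) = n.all (cellOne grid) := by
  intro n
  induction n with
  | nil => intro c; simp [panduanLoop]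
  | cons e rest ih =>
    intro c
    simp only [panduanLoop, cellOne, List.all_cons]
    cases h0 : PySem.List.pyGet? e 0 with
    | none => simp
    | some i =>
      simp only []
      cases h1 : PySem.List.pyGet? e 1 with
      | none => simp
      | some j =>
        simp only [h1, isOne]
        cases h2 : PySem.List.pyGet? grid i with
        | none => simp
        | some row =>
          simp only [h2]
          cases h3 : PySem.List.pyGet? row j with
          | none => simp
          | some v =>
            simp only [h3, add_zero]
            by_cases hv : v = 1
            · simp only [hv, beq_self_eq_true, Bool.true_and, if_true, List.length_cons]
              push_cast
              rw [← ih (c + 1)]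
              cases hl : panduanLoop grid rest (c + 1) with
              | none => simp [hl]
              | some c' =>
                simp only [hl]
                have harith : (rest.length : Int) + 1 + c = (rest.length : Int) + (c + 1) := by
                  ring
                rw [harith]
            · have hvb : (v == 1) = false := by simp [hv]
              simp only [hvb, Bool.false_and, List.length_cons]
              simp only [Bool.false_eq_true, if_false]
              cases hl : panduanLoop grid rest c with
              | none => simp [hl]
              | some c' =>
                have hle := panduanLoop_le rest c c' hl
                push_cast
                have hne : ¬ ((rest.length : Int) + 1 + c = c') := by omega
                simp [beq_iff_eq, hne]

theorem panduan_eq_all (n grid : List (List Int)) :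
    panduan n grid = n.all (cellOne grid) := by
  have h := panduanLoop_all (grid := grid) n 0
  unfold panduan
  cases hl : panduanLoop grid n 0 with
  | none => rw [hl] at h; simpa using h
  | some c =>
    rw [hl] at h
    simp only [add_zero] at h
    rw [← h]
    cases hx : ((n.length : Int) == c) <;> simp [hx]

theorem foldl_append_map {α β : Type} (f : α → β) : ∀ (l : List α) (init : List β),
    l.foldl (fun acc k => acc ++ [f k]) init = init ++ l.map f := by
  intro l
  induction l with
  | nil => simp
  | cons x xs ih => intro init; simp [List.foldl_cons, ih]

theorem cellOne_pair (grid : List (List Int)) (i j : Int) :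
    cellOne grid [i, j] = isOne grid i j := by
  simp [cellOne, PySem.List.pyGet?, PySem.List.pyIdx?]

theorem judge_eq_altLoop (grid : List (List Int)) :
    ∀ (m : Nat) (b : Int), b.toNat ≤ m → ∀ (a L count k : Int),
      judge_N (a, b) grid L count + count * k = count * altLoop grid a b (L - k) k := by
  intro m
  induction m with
  | zero =>
    intro b hb a L count k
    have hb' : ¬ (b > 0) := by omega
    rw [judge_N.eq_def, altLoop.eq_def]
    simp [hb']
  | succ n ih =>
    intro b hb a L count k
    by_cases hbpos : b > 0
    · rw [judge_N.eq_def, altLoop.eq_def]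
      simp only [hbpos, dite_true]
      by_cases ha : a + 1 ≥ 0
      · have ha' : ¬ (a + 1 < 0) := by omega
        simp only [ha, if_true, ha', if_false]
        have hrange : (2 * ((L - k) + k) + 1) = L * 2 + 1 := by ring
        simp only [hrange]
        have hcond : panduan
            ((PySem.List.pyRange 0 (L * 2 + 1) 1).foldl
              (fun acc kk => acc ++ [[a + 1, b - 1 + kk]]) []) grid
            = (PySem.List.pyRange 0 (L * 2 + 1) 1).all
              (fun j => isOne grid (a + 1) (b - 1 + j)) := by
          rw [panduan_eq_all, foldl_append_map (fun kk => [a + 1, b - 1 + kk])]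
          simp only [List.nil_append, List.all_map, Function.comp_def, cellOne_pair]
        rw [hcond]
        by_cases hall : (PySem.List.pyRange 0 (L * 2 + 1) 1).all
            (fun j => isOne grid (a + 1) (b - 1 + j)) = true
        · simp only [hall, if_true]
          have hb1 : (b - 1).toNat ≤ n := by omega
          have := ih (b - 1) hb1 (a + 1) (L + 1) count (k + 1)
          have hLk : L + 1 - (k + 1) = L - k := by ring
          rw [hLk] at this
          linarith
        · simp only [Bool.not_eq_true] at hall
          simp [hall]
      · have ha1 : ¬ (a + 1 ≥ 0) := ha
        have ha2 : a + 1 < 0 := by omega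
        simp [ha1, ha2]
    · rw [judge_N.eq_def, altLoop.eq_def]
      simp [hbpos]

-- ===== VERDICT (by name: the statement is the Claim_ definition above) =====
theorem judge_N_spec : Claim_equal_judge_N := by
  intro a0 grid L count _ _
  unfold Spec_judge_N judge_N_alt
  have := judge_eq_altLoop grid a0.2.toNat a0.2 le_rfl a0.1 L count 0
  simpa using this
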